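-- pv_equiv track=rewrite | github.com/H120-cloud/Oracle-project | src/core/professional_scanner.py | _identify_theme
-- ===== SOURCE A (Python) =====
-- def _identify_theme(ticker: str, sector: str) -> str:
--     themes = {
--         "AI": ["AI", "SOUN", "IONQ", "QBTS", "NVDA", "PLTR"],
--         "Biotech": ["BIOTECH", "PHARMA", "THERAPEUTICS", "CLINICAL"],
--         "EV": ["TSLA", "RIVN", "NIO", "XPEV", "LI", "LCID"],
--         "Space": ["ASTS", "RKLB", "SPCE", "ACHR", "LILM", "JOBY"],
--         "Fintech": ["SOFI", "HOOD", "SQ", "PYPL", "UPST", "AFRM"],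
--         "Crypto": ["COIN", "MSTR", "RIOT", "MARA"],
--         "Gaming": ["GME", "AMC", "RBLX", "DKNG"],
--         "China": ["BABA", "JD", "PDD", "BIDU", "NIO", "XPEV", "LI"],
--         "Meme": ["GME", "AMC", "BB", "NOK"],
--     }
--     for theme, tickers in themes.items():
--         if ticker.upper() in [t.upper() for t in tickers]: return theme
--     return sector if sector else "unknown"
-- ===== SOURCE B (Python) =====
-- # Flat ticker->theme lookup table, written out directly (duplicates from the
-- # original per-theme lists resolved first-theme-wins at write time: NIO/XPEV/LI
-- # -> EV, GME/AMC -> Gaming).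
-- _THEME_OF = {
--     "AI": "AI", "SOUN": "AI", "IONQ": "AI", "QBTS": "AI", "NVDA": "AI", "PLTR": "AI",
--     "BIOTECH": "Biotech", "PHARMA": "Biotech", "THERAPEUTICS": "Biotech", "CLINICAL": "Biotech",
--     "TSLA": "EV", "RIVN": "EV", "NIO": "EV", "XPEV": "EV", "LI": "EV", "LCID": "EV",
--     "ASTS": "Space", "RKLB": "Space", "SPCE": "Space", "ACHR": "Space", "LILM": "Space", "JOBY": "Space",
--     "SOFI": "Fintech", "HOOD": "Fintech", "SQ": "Fintech", "PYPL": "Fintech", "UPST": "Fintech", "AFRM": "Fintech",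
--     "COIN": "Crypto", "MSTR": "Crypto", "RIOT": "Crypto", "MARA": "Crypto",
--     "GME": "Gaming", "AMC": "Gaming", "RBLX": "Gaming", "DKNG": "Gaming",
--     "BABA": "China", "JD": "China", "PDD": "China", "BIDU": "China",
--     "BB": "Meme", "NOK": "Meme",
-- }
--
-- def _identify_theme(ticker: str, sector: str) -> str:
--     return _THEME_OF.get(ticker.upper(), sector or "unknown")
-- ===== Notes on version B (the rewrite author's own statement) =====
-- stated objective: idiomatic
-- what changed: A's per-call loop over nine theme lists (uppercasing every list each call) is replaced by one flat ticker->theme dict literal (duplicates resolved first-theme-wins at write time) and the body becomes a single dict .get with the sector/'unknown' fallback.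
import Mathlib
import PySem

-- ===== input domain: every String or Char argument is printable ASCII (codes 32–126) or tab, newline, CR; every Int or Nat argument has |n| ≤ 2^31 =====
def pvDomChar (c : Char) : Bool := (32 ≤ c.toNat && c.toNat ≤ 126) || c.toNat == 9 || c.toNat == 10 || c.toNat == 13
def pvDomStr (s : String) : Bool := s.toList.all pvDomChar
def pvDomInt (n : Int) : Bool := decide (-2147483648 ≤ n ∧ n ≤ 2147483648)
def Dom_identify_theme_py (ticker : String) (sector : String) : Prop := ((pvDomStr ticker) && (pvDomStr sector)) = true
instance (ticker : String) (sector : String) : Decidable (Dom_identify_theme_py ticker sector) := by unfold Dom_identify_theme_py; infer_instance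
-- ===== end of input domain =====

-- B replaces A's per-call loop over nine theme lists by one flat ticker→theme dict literal
-- (duplicates resolved first-theme-wins at write time) and a single .get (objective: idiomatic).

-- ===== PORT A =====
-- the themes dict literal of A
def pvThemesA : List (String × List String) :=
  [("AI", ["AI", "SOUN", "IONQ", "QBTS", "NVDA", "PLTR"]),
   ("Biotech", ["BIOTECH", "PHARMA", "THERAPEUTICS", "CLINICAL"]),
   ("EV", ["TSLA", "RIVN", "NIO", "XPEV", "LI", "LCID"]),
   ("Space", ["ASTS", "RKLB", "SPCE", "ACHR", "LILM", "JOBY"]),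
   ("Fintech", ["SOFI", "HOOD", "SQ", "PYPL", "UPST", "AFRM"]),
   ("Crypto", ["COIN", "MSTR", "RIOT", "MARA"]),
   ("Gaming", ["GME", "AMC", "RBLX", "DKNG"]),
   ("China", ["BABA", "JD", "PDD", "BIDU", "NIO", "XPEV", "LI"]),
   ("Meme", ["GME", "AMC", "BB", "NOK"])]

-- A's for-loop with an early return: first theme whose (uppercased) ticker list contains ticker.upper()
def pvLoopA (u : String) : List (String × List String) → Option String
  | [] => none
  | (theme, tickers) :: rest =>
      if u ∈ tickers.map PySem.Str.upper then some theme else pvLoopA u rest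

def identify_theme_py (ticker : String) (sector : String) : String :=
  match pvLoopA (PySem.Str.upper ticker) pvThemesA with
  | some theme => theme
  | none => if sector ≠ "" then sector else "unknown"

-- ===== PORT B =====
-- B's flat module-level dict literal _THEME_OF (first-theme-wins for A's duplicate tickers)
def pvThemeOf : PySem.Dict String String :=
  PySem.Dict.mk
    [("AI", "AI"), ("SOUN", "AI"), ("IONQ", "AI"), ("QBTS", "AI"), ("NVDA", "AI"), ("PLTR", "AI"),
     ("BIOTECH", "Biotech"), ("PHARMA", "Biotech"), ("THERAPEUTICS", "Biotech"), ("CLINICAL", "Biotech"),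
     ("TSLA", "EV"), ("RIVN", "EV"), ("NIO", "EV"), ("XPEV", "EV"), ("LI", "EV"), ("LCID", "EV"),
     ("ASTS", "Space"), ("RKLB", "Space"), ("SPCE", "Space"), ("ACHR", "Space"), ("LILM", "Space"), ("JOBY", "Space"),
     ("SOFI", "Fintech"), ("HOOD", "Fintech"), ("SQ", "Fintech"), ("PYPL", "Fintech"), ("UPST", "Fintech"), ("AFRM", "Fintech"),
     ("COIN", "Crypto"), ("MSTR", "Crypto"), ("RIOT", "Crypto"), ("MARA", "Crypto"),
     ("GME", "Gaming"), ("AMC", "Gaming"), ("RBLX", "Gaming"), ("DKNG", "Gaming"),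
     ("BABA", "China"), ("JD", "China"), ("PDD", "China"), ("BIDU", "China"),
     ("BB", "Meme"), ("NOK", "Meme")]

-- return _THEME_OF.get(ticker.upper(), sector or "unknown")
def identify_theme_py_alt (ticker : String) (sector : String) : String :=
  pvThemeOf.getD (PySem.Str.upper ticker) (if sector ≠ "" then sector else "unknown")

-- ===== PRECONDITION & SPEC =====
def Spec_identify_theme_py (ticker : String) (sector : String) (out : String) : Prop := out = identify_theme_py_alt ticker sector
instance (ticker : String) (sector : String) (out : String) : Decidable (Spec_identify_theme_py ticker sector out) := by unfold Spec_identify_theme_py; infer_instance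

-- ===== CLAIM (what is proved, stated in full; the proofs are below) =====
def Claim_equal_identify_theme_py : Prop := ∀ (ticker : String) (sector : String), Dom_identify_theme_py ticker sector → Spec_identify_theme_py ticker sector (identify_theme_py ticker sector)

-- ===== LEMMAS AND PROOFS =====

-- all ticker keys appearing in either program's table (uppercased, first occurrence order)
def pvAllKeys : List String := ["AI", "SOUN", "IONQ", "QBTS", "NVDA", "PLTR", "BIOTECH", "PHARMA", "THERAPEUTICS", "CLINICAL", "TSLA", "RIVN", "NIO", "XPEV", "LI", "LCID", "ASTS", "RKLB", "SPCE", "ACHR", "LILM", "JOBY", "SOFI", "HOOD", "SQ", "PYPL", "UPST", "AFRM", "COIN", "MSTR", "RIOT", "MARA", "GME", "AMC", "RBLX", "DKNG", "BABA", "JD", "PDD", "BIDU", "BB", "NOK"]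

set_option maxRecDepth 100000 in
set_option maxHeartbeats 2000000 in
lemma pvLoop_eq_get (u : String) : pvLoopA u pvThemesA = pvThemeOf.get? u := by
  by_cases h : u ∈ pvAllKeys
  · fin_cases h <;> decide
  · simp only [pvAllKeys, List.mem_cons, List.not_mem_nil, or_false, not_or] at h
    obtain ⟨h1, h2, h3, h4, h5, h6, h7, h8, h9, h10, h11, h12, h13, h14, h15, h16, h17, h18,
      h19, h20, h21, h22, h23, h24, h25, h26, h27, h28, h29, h30, h31, h32, h33, h34, h35,
      h36, h37, h38, h39, h40, h41, h42⟩ := h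
    simp only [pvThemesA, pvLoopA,
      show List.map PySem.Str.upper ["AI", "SOUN", "IONQ", "QBTS", "NVDA", "PLTR"]
        = ["AI", "SOUN", "IONQ", "QBTS", "NVDA", "PLTR"] from by decide,
      show List.map PySem.Str.upper ["BIOTECH", "PHARMA", "THERAPEUTICS", "CLINICAL"]
        = ["BIOTECH", "PHARMA", "THERAPEUTICS", "CLINICAL"] from by decide,
      show List.map PySem.Str.upper ["TSLA", "RIVN", "NIO", "XPEV", "LI", "LCID"]
        = ["TSLA", "RIVN", "NIO", "XPEV", "LI", "LCID"] from by decide,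
      show List.map PySem.Str.upper ["ASTS", "RKLB", "SPCE", "ACHR", "LILM", "JOBY"]
        = ["ASTS", "RKLB", "SPCE", "ACHR", "LILM", "JOBY"] from by decide,
      show List.map PySem.Str.upper ["SOFI", "HOOD", "SQ", "PYPL", "UPST", "AFRM"]
        = ["SOFI", "HOOD", "SQ", "PYPL", "UPST", "AFRM"] from by decide,
      show List.map PySem.Str.upper ["COIN", "MSTR", "RIOT", "MARA"]
        = ["COIN", "MSTR", "RIOT", "MARA"] from by decide,
      show List.map PySem.Str.upper ["GME", "AMC", "RBLX", "DKNG"]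
        = ["GME", "AMC", "RBLX", "DKNG"] from by decide,
      show List.map PySem.Str.upper ["BABA", "JD", "PDD", "BIDU", "NIO", "XPEV", "LI"]
        = ["BABA", "JD", "PDD", "BIDU", "NIO", "XPEV", "LI"] from by decide,
      show List.map PySem.Str.upper ["GME", "AMC", "BB", "NOK"]
        = ["GME", "AMC", "BB", "NOK"] from by decide,
      List.mem_cons, List.not_mem_nil, or_false,
      pvThemeOf, PySem.Dict.get?_mk_cons]
    simp [h1, h2, h3, h4, h5, h6, h7, h8, h9, h10, h11, h12, h13, h14, h15, h16, h17, h18,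
      h19, h20, h21, h22, h23, h24, h25, h26, h27, h28, h29, h30, h31, h32, h33, h34, h35,
      h36, h37, h38, h39, h40, h41, h42, Ne.symm, PySem.Dict.get?]

-- ===== VERDICT (by name: the statement is the Claim_ definition above) =====
theorem identify_theme_py_spec : Claim_equal_identify_theme_py := by
  intro ticker sector _
  unfold Spec_identify_theme_py identify_theme_py identify_theme_py_alt
  rw [PySem.Dict.getD_eq_get?_getD, ← pvLoop_eq_get]
  cases pvLoopA (PySem.Str.upper ticker) pvThemesA <;> rfl
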